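-- pv_equiv track=rewrite | github.com/bioinformatika16/Bioinformatika_Grupa16 | Project16_JosipSarlija/MSA.py | calculate_s
-- ===== SOURCE A (Python) =====
-- class NucleotideScoring:
--     MATCH = 1
--     MISMATCH = -1
--     GAP = -2
--
-- def calculate_s(sequence):
--     sequence = tuple(sequence)
--     result = 0
--     for i in range(0, len(sequence)):
--         for j in range(i+1, len(sequence)):
--             if sequence[i] == sequence[j]:
--                 result += NucleotideScoring.MATCH
--             elif sequence[i] == '-' or sequence[j] == '-':
--                 result += NucleotideScoring.GAP
--             else:
--                 result += NucleotideScoring.MISMATCH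
--     return result
-- ===== SOURCE B (Python) =====
-- def calculate_s(sequence):
--     result = 0
--     seen = 0
--     gaps = 0
--     counts = {}
--     for ch in sequence:
--         same = counts.get(ch, 0)
--         if ch == '-':
--             result += same - 2 * (seen - gaps)
--             gaps += 1
--         else:
--             result += 2 * same - seen - gaps
--         counts[ch] = same + 1
--         seen += 1
--     return result
-- ===== Notes on version B (the rewrite author's own statement) =====
-- stated objective: faster
-- what changed: Replaced the O(n^2) all-pairs double loop with a single pass that keeps character counts in a dict and adds each new character's pair contributions (matches, gap pairs, mismatches) in O(1) via counting arithmetic.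
import Mathlib
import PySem

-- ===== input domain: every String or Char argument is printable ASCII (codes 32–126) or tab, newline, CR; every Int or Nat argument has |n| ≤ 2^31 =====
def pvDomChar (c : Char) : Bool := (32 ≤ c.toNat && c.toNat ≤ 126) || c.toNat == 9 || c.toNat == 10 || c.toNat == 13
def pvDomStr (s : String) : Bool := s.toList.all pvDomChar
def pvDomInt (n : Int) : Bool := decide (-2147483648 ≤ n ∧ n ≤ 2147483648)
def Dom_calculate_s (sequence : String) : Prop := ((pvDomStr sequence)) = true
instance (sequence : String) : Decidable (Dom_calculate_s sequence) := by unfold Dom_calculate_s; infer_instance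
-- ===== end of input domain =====

-- B replaces A's O(n^2) all-pairs double loop by a one-pass count-based accumulation (objective: faster, asymptotic).

-- ===== PORT A =====
def calculate_s (sequence : String) : Int :=
  let seq : List Char := sequence.toList
  let n : Int := seq.length
  (PySem.List.pyRange 0 n 1).foldl (fun result i =>
    (PySem.List.pyRange (i+1) n 1).foldl (fun result j =>
      if PySem.List.pyGetD seq i ' ' = PySem.List.pyGetD seq j ' ' then result + 1
      else if PySem.List.pyGetD seq i ' ' = '-' ∨ PySem.List.pyGetD seq j ' ' = '-' then result + (-2)
      else result + (-1)) result) 0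

-- ===== PORT B =====
-- state: (result, seen, gaps, counts)
def calcStep (st : Int × Int × Int × PySem.Dict Char Int) (ch : Char) :
    Int × Int × Int × PySem.Dict Char Int :=
  let result := st.1
  let seen := st.2.1
  let gaps := st.2.2.1
  let counts := st.2.2.2
  let same := counts.getD ch 0
  if ch = '-' then
    (result + (same - 2 * (seen - gaps)), seen + 1, gaps + 1, counts.insert ch (same + 1))
  else
    (result + (2 * same - seen - gaps), seen + 1, gaps, counts.insert ch (same + 1))

def calculate_s_alt (sequence : String) : Int :=
  (sequence.toList.foldl calcStep (0, 0, 0, PySem.Dict.empty)).1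

-- ===== PRECONDITION & SPEC =====
def Spec_calculate_s (sequence : String) (out : Int) : Prop := out = calculate_s_alt sequence
instance (sequence : String) (out : Int) : Decidable (Spec_calculate_s sequence out) := by unfold Spec_calculate_s; infer_instance

-- ===== CLAIM (what is proved, stated in full; the proofs are below) =====
def Claim_equal_calculate_s : Prop := ∀ (sequence : String), Dom_calculate_s sequence → Spec_calculate_s sequence (calculate_s sequence)

-- ===== LEMMAS AND PROOFS =====

-- pair score of two characters, as A computes it
def score (a b : Char) : Int :=
  if a = b then 1 else if a = '-' ∨ b = '-' then -2 else -1

-- sum of scores over all unordered pairs, recursing on the front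
def pairSum : List Char → Int
  | [] => 0
  | c :: t => (t.map (score c)).sum + pairSum t

theorem pairSum_append_singleton (p : List Char) (c : Char) :
    pairSum (p ++ [c]) = pairSum p + (p.map (fun x => score x c)).sum := by
  induction p with
  | nil => simp [pairSum]
  | cons a t ih =>
      simp only [List.cons_append, pairSum, List.map_append, List.map_cons, List.map_nil,
        List.sum_append, List.sum_cons, List.sum_nil, ih]
      ring

-- closed form for the sum of scores of a new character against a list
theorem sum_score_closed (p : List Char) (c : Char) :
    (p.map (fun x => score x c)).sum =
      if c = '-' then (p.count c : Int) - 2 * ((p.length : Int) - p.count '-')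
      else 2 * (p.count c : Int) - (p.length : Int) - p.count '-' := by
  induction p with
  | nil => simp
  | cons a t ih =>
      simp only [List.map_cons, List.sum_cons, ih, List.count_cons, List.length_cons]
      by_cases hc : c = '-' <;> by_cases hac : a = c <;> by_cases ha : a = '-' <;>
        simp only [score, hc, hac, ha, beq_iff_eq, or_true, true_or,
          if_pos, if_neg, not_false_iff] <;>
        simp_all <;> push_cast <;> ring

-- loop invariant of B's single pass
theorem calcStep_invariant (p : List Char) :
    p.foldl calcStep (0, 0, 0, PySem.Dict.empty) =
      (pairSum p, (p.length : Int), (p.count '-' : Int),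
        p.foldl (fun d x => d.insert x (d.getD x 0 + 1)) PySem.Dict.empty) := by
  induction p using List.reverseRecOn with
  | nil => simp [pairSum]
  | append_singleton t c ih =>
      rw [List.foldl_append, List.foldl_append, ih]
      simp only [List.foldl_cons, List.foldl_nil, calcStep]
      rw [PySem.Dict.foldl_insert_getD_add_one_eq_counter, PySem.Dict.getD_counter,
        pairSum_append_singleton, sum_score_closed]
      by_cases hc : c = '-' <;>
        simp [hc, List.count_append, List.length_append] <;> push_cast <;> ring

-- B computes pairSum
theorem alt_eq_pairSum (s : String) : calculate_s_alt s = pairSum s.toList := by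
  unfold calculate_s_alt
  rw [calcStep_invariant]

-- A's if-chain adds exactly `score`
theorem body_eq (r : Int) (si sj : Char) :
    (if si = sj then r + 1 else if si = '-' ∨ sj = '-' then r + (-2) else r + (-1)) =
      r + score si sj := by
  simp only [score]; split_ifs <;> ring

-- the index sum Σ_k (scores of cs[k] against the suffix after k) is pairSum
theorem sum_range_eq_pairSum (cs : List Char) :
    ((List.range cs.length).map (fun k =>
      ((cs.drop (k+1)).map (score (cs.getD k ' '))).sum)).sum = pairSum cs := by
  induction cs with
  | nil => simp [pairSum]
  | cons c t ih =>
      rw [List.length_cons, List.range_succ_eq_map]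
      simp only [List.map_cons, List.sum_cons, List.map_map]
      have hshift : ((fun k => (((c :: t).drop (k+1)).map (score ((c :: t).getD k ' '))).sum)
          ∘ Nat.succ) =
          fun k => ((t.drop (k+1)).map (score (t.getD k ' '))).sum := by
        funext k
        simp [Function.comp, Nat.succ_eq_add_one, List.drop_succ_cons]
      rw [hshift, ih]
      simp [pairSum]

-- A's double loop computes pairSum
theorem a_eq_pairSum (cs : List Char) :
    (PySem.List.pyRange 0 (cs.length : Int) 1).foldl (fun result i =>
      (PySem.List.pyRange (i+1) (cs.length : Int) 1).foldl (fun result j =>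
        if PySem.List.pyGetD cs i ' ' = PySem.List.pyGetD cs j ' ' then result + 1
        else if PySem.List.pyGetD cs i ' ' = '-' ∨ PySem.List.pyGetD cs j ' ' = '-' then result + (-2)
        else result + (-1)) result) 0 = pairSum cs := by
  have hinner : ∀ (r : Int) (i : Int), 0 ≤ i →
      (PySem.List.pyRange (i+1) (cs.length : Int) 1).foldl (fun result j =>
        if PySem.List.pyGetD cs i ' ' = PySem.List.pyGetD cs j ' ' then result + 1
        else if PySem.List.pyGetD cs i ' ' = '-' ∨ PySem.List.pyGetD cs j ' ' = '-' then result + (-2)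
        else result + (-1)) r
      = r + ((cs.drop (i+1).toNat).map (score (PySem.List.pyGetD cs i ' '))).sum := by
    intro r i hi
    simp only [body_eq]
    rw [PySem.List.foldl_add]
    have hmap : (PySem.List.pyRange (i+1) (cs.length : Int) 1).map
        (fun j => score (PySem.List.pyGetD cs i ' ') (PySem.List.pyGetD cs j ' '))
        = ((PySem.List.pyRange (i+1) (cs.length : Int) 1).map
            (fun j => PySem.List.pyGetD cs j ' ')).map (score (PySem.List.pyGetD cs i ' ')) := by
      rw [List.map_map]; rfl
    rw [hmap, PySem.List.map_pyGetD_pyRange' cs ' ' (by omega)]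
  have hstep : ∀ (r : Int) (k : Nat),
      (PySem.List.pyRange ((k : Int)+1) (cs.length : Int) 1).foldl (fun result j =>
        if PySem.List.pyGetD cs (k : Int) ' ' = PySem.List.pyGetD cs j ' ' then result + 1
        else if PySem.List.pyGetD cs (k : Int) ' ' = '-' ∨ PySem.List.pyGetD cs j ' ' = '-' then result + (-2)
        else result + (-1)) r
      = r + ((cs.drop (k+1)).map (score (cs.getD k ' '))).sum := by
    intro r k
    rw [hinner r (k : Int) (by positivity)]
    have h1 : ((k : Int) + 1).toNat = k + 1 := by omega
    rw [h1, PySem.List.pyGetD_natCast]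
  rw [PySem.List.pyRange_one]
  simp only [sub_zero, Int.toNat_natCast, List.foldl_map, zero_add]
  simp only [hstep]
  rw [PySem.List.foldl_add]
  rw [sum_range_eq_pairSum, zero_add]

-- ===== VERDICT (by name: the statement is the Claim_ definition above) =====
theorem calculate_s_spec : Claim_equal_calculate_s := by
  intro s _
  unfold Spec_calculate_s calculate_s
  rw [alt_eq_pairSum, ← a_eq_pairSum s.toList]
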